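-- pv_equiv track=rewrite | github.com/tomdu3/free-codecamp-challenges | daily_challenge_fcc/2025/2025-12/25-12-23/re_email_count.py | email_chain_count
-- ===== SOURCE A (Python) =====
-- def email_chain_count(subject):
--     """Count the number of times the email has been forwarded or replied to."""
--     re_fwd = ['fw:', 'fwd:', 're:']
--     count = 0
--     subject_lower = subject.lower()
--     for marker in re_fwd:
--         if marker in subject_lower:
--             count += subject_lower.count(marker)
--
--     return count
-- ===== SOURCE B (Python) =====
-- def email_chain_count(subject):
--     """Count the number of times the email has been forwarded or replied to."""
--     s = subject.lower()
--     markers = ('fw:', 'fwd:', 're:')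
--     return sum(1 for i in range(len(s)) if s.startswith(markers, i))
-- ===== Notes on version B (the rewrite author's own statement) =====
-- stated objective: alternative
-- what changed: Replaces three independent .count scans (one per marker) with a single left-to-right pass that tests all three markers at each position; equal because the markers never overlap each other or themselves.
import Mathlib
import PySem

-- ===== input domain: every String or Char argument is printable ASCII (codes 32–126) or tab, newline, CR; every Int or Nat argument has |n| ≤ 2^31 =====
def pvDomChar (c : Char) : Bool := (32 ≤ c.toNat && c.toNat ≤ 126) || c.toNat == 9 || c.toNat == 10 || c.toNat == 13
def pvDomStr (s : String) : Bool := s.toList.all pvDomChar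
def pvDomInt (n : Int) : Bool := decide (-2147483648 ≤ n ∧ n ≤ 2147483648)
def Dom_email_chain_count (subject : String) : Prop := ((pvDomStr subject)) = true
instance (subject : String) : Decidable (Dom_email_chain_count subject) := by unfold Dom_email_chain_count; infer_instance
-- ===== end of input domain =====

-- B replaces A's three independent marker .count scans with a single left-to-right pass
-- testing all three markers at each position (equal since the markers never overlap); objective: alternative.


-- ===== PORT A =====
-- A: lowercase once, then for each marker, if it occurs add its (non-overlapping) occurrence count.
def email_chain_count (subject : String) : Int :=
  let re_fwd : List String := ["fw:", "fwd:", "re:"]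
  let subject_lower := PySem.Str.lower subject
  re_fwd.foldl
    (fun count marker =>
      if PySem.Str.isIn marker subject_lower then
        count + (PySem.Str.count subject_lower marker : Int)
      else count) 0

-- ===== PORT B =====
-- B: one pass over all positions of the lowered string (= its suffixes), adding 1 where any marker starts.
def bStartsAny (l : List Char) : Bool :=
  ([['f','w',':'], ['f','w','d',':'], ['r','e',':']] : List (List Char)).any
    (fun m => m.isPrefixOf l)

def bScan : List Char → Int
  | [] => 0
  | c :: t => (if bStartsAny (c :: t) then 1 else 0) + bScan t

def email_chain_count_alt (subject : String) : Int :=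
  bScan (PySem.Str.lower subject).toList

-- ===== PRECONDITION & SPEC =====
def Spec_email_chain_count (subject : String) (out : Int) : Prop := out = email_chain_count_alt subject
instance (subject : String) (out : Int) : Decidable (Spec_email_chain_count subject out) := by unfold Spec_email_chain_count; infer_instance

-- ===== CLAIM (what is proved, stated in full; the proofs are below) =====
def Claim_equal_email_chain_count : Prop := ∀ (subject : String), Dom_email_chain_count subject → Spec_email_chain_count subject (email_chain_count subject)

-- ===== LEMMAS AND PROOFS =====

-- number of suffixes of l at which sub starts
def tcount (sub : List Char) : List Char → Nat
  | [] => 0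
  | c :: t => (if sub.isPrefixOf (c :: t) then 1 else 0) + tcount sub t

-- sub has no proper border reachable by dropping: occurrences can never overlap
def BorderFree (sub : List Char) : Prop :=
  ∀ k, k < sub.length → 0 < k → ¬ sub.drop k <+: sub

-- a second occurrence of a border-free sub cannot start strictly inside a first one
lemma no_overlap {sub l : List Char} (hbf : BorderFree sub) (hp : sub <+: l)
    {k : Nat} (hk0 : 0 < k) (hk : k < sub.length) : ¬ sub.isPrefixOf (l.drop k) = true := by
  intro h
  obtain ⟨r, rfl⟩ := hp
  rw [List.drop_append_of_le_length (le_of_lt hk)] at h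
  have h' : sub <+: sub.drop k ++ r := List.isPrefixOf_iff_prefix.mp h
  have hd : sub.drop k <+: sub.drop k ++ r := List.prefix_append _ _
  rcases List.prefix_or_prefix_of_prefix hd h' with hc | hc
  · exact hbf k hk hk0 hc
  · have := hc.length_le
    simp [List.length_drop] at this
    omega

lemma tcount_drop_aux {sub l : List Char} (hbf : BorderFree sub) (hne : sub ≠ [])
    (hp : sub <+: l) :
    ∀ k, k ≤ sub.length →
      tcount sub (l.drop k) = (if k = 0 then 1 else 0) + tcount sub (l.drop sub.length) := by
  intro k hk
  induction hn : sub.length - k generalizing k with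
  | zero =>
      have hke : k = sub.length := by omega
      subst hke
      have : sub.length ≠ 0 := fun h => hne (List.length_eq_zero_iff.mp h)
      simp [this]
  | succ n ih =>
      have hklt : k < sub.length := by omega
      have hlen : sub.length ≤ l.length := hp.length_le
      have hkl : k < l.length := lt_of_lt_of_le hklt hlen
      obtain ⟨c, t, hct⟩ : ∃ c t, l.drop k = c :: t := by
        cases hdk : l.drop k with
        | nil => exact absurd (by simpa using congrArg List.length hdk) (by omega)
        | cons c t => exact ⟨c, t, rfl⟩
      have ht : t = l.drop (k + 1) := by
        have := congrArg (List.drop 1) hct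
        simpa [List.drop_drop, Nat.add_comm] using this.symm
      have hrec := ih (k + 1) (by omega) (by omega)
      rw [← ht] at hrec
      rw [hct, tcount, hrec]
      by_cases hk0 : k = 0
      · subst hk0
        have hpfx : sub.isPrefixOf (c :: t) = true := by
          rw [← hct]
          simpa using List.isPrefixOf_iff_prefix.mpr hp
        simp [hpfx]
      · have hpfx : ¬ sub.isPrefixOf (c :: t) = true := fun h =>
          no_overlap hbf hp (Nat.pos_of_ne_zero hk0) hklt (by rw [hct]; exact h)
        simp [hpfx, hk0]

lemma tcount_drop {sub l : List Char} (hbf : BorderFree sub) (hne : sub ≠ [])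
    (hp : sub <+: l) : tcount sub l = 1 + tcount sub (l.drop sub.length) := by
  simpa using tcount_drop_aux hbf hne hp 0 (Nat.zero_le _)

lemma go_eq_tcount {sub : List Char} (hbf : BorderFree sub) (hne : sub ≠ []) :
    ∀ fuel l acc, l.length ≤ fuel →
      PySem.Chars.count.go sub fuel l acc = acc + tcount sub l := by
  intro fuel
  induction fuel using Nat.strong_induction_on with
  | _ fuel ih =>
    intro l acc hfl
    match fuel, l with
    | 0, l =>
        have : l = [] := List.length_eq_zero_iff.mp (by omega)
        subst this
        simp [PySem.Chars.count.go, tcount]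
    | Nat.succ f, [] =>
        simp [PySem.Chars.count.go, tcount]
    | Nat.succ f, c :: t =>
        rw [PySem.Chars.count.go]
        by_cases hp : sub.isPrefixOf (c :: t) = true
        · have hpre : sub <+: c :: t := List.isPrefixOf_iff_prefix.mp hp
          have hlen0 : 0 < sub.length := List.length_pos_iff.mpr hne
          have hdl : ((c :: t).drop sub.length).length ≤ f := by
            have := hpre.length_le
            simp only [List.length_drop]
            simp at hfl ⊢
            omega
          simp only [hp, if_true]
          rw [ih f (by omega) ((c :: t).drop sub.length) (acc + 1) hdl,
            tcount_drop hbf hne hpre]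
          omega
        · have hp' : sub.isPrefixOf (c :: t) = false := by rwa [← Bool.not_eq_true]
          simp only [hp', Bool.false_eq_true, if_false]
          rw [ih f (by omega) t acc (by simp at hfl; omega)]
          have htc : tcount sub (c :: t) = tcount sub t := by simp [tcount, hp']
          omega

lemma count_eq_tcount {sub l : List Char} (hbf : BorderFree sub) (hne : sub ≠ []) :
    PySem.Chars.count l sub = tcount sub l := by
  have hie : sub.isEmpty = false := by simpa using hne
  rw [PySem.Chars.count, hie]
  simpa using go_eq_tcount hbf hne l.length l 0 le_rfl

lemma tcount_eq_zero_of_not_isIn {sub l : List Char}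
    (h : PySem.Chars.isIn sub l = false) : tcount sub l = 0 := by
  have hno : ∀ j, ¬ sub <+: l.drop j := by
    intro j hj
    have : PySem.Chars.isIn sub l = true :=
      (PySem.Chars.exists_prefix_drop_iff_isIn sub l).mp ⟨j, hj⟩
    simp [h] at this
  clear h
  induction l with
  | nil => simp [tcount]
  | cons c t ih =>
      have h0 : ¬ sub.isPrefixOf (c :: t) = true := fun hp =>
        hno 0 (by simpa using List.isPrefixOf_iff_prefix.mp hp)
      have ht : ∀ j, ¬ sub <+: t.drop j := fun j hj => hno (j + 1) (by simpa using hj)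
      simp [tcount, h0, ih ht]

-- one per-marker step of A's fold equals adding tcount of that marker
lemma step_eq {sub l : List Char} (hbf : BorderFree sub) (hne : sub ≠ []) (c : Int) :
    (if PySem.Chars.isIn sub l then c + (PySem.Chars.count l sub : Int) else c)
      = c + (tcount sub l : Int) := by
  by_cases h : PySem.Chars.isIn sub l = true
  · simp [h, count_eq_tcount hbf hne]
  · have h' : PySem.Chars.isIn sub l = false := by simpa using h
    simp [h', tcount_eq_zero_of_not_isIn h']

-- the three markers are mutually exclusive at any position
lemma excl12 {l : List Char} (h1 : (['f','w',':'] : List Char).isPrefixOf l = true)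
    (h2 : (['f','w','d',':'] : List Char).isPrefixOf l = true) : False := by
  rcases List.prefix_or_prefix_of_prefix (List.isPrefixOf_iff_prefix.mp h1)
    (List.isPrefixOf_iff_prefix.mp h2) with h | h <;> revert h <;> decide

lemma excl13 {l : List Char} (h1 : (['f','w',':'] : List Char).isPrefixOf l = true)
    (h3 : (['r','e',':'] : List Char).isPrefixOf l = true) : False := by
  rcases List.prefix_or_prefix_of_prefix (List.isPrefixOf_iff_prefix.mp h1)
    (List.isPrefixOf_iff_prefix.mp h3) with h | h <;> revert h <;> decide

lemma excl23 {l : List Char} (h2 : (['f','w','d',':'] : List Char).isPrefixOf l = true)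
    (h3 : (['r','e',':'] : List Char).isPrefixOf l = true) : False := by
  rcases List.prefix_or_prefix_of_prefix (List.isPrefixOf_iff_prefix.mp h2)
    (List.isPrefixOf_iff_prefix.mp h3) with h | h <;> revert h <;> decide

-- B's scan splits into the three per-marker suffix counts
lemma bScan_eq (l : List Char) :
    bScan l = (tcount ['f','w',':'] l : Int) + (tcount ['f','w','d',':'] l : Int)
      + (tcount ['r','e',':'] l : Int) := by
  induction l with
  | nil => simp [bScan, tcount]
  | cons c t ih =>
      rw [bScan, ih]
      simp only [tcount]
      by_cases h1 : (['f','w',':'] : List Char).isPrefixOf (c :: t) = true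
      · by_cases h2 : (['f','w','d',':'] : List Char).isPrefixOf (c :: t) = true
        · exact (excl12 h1 h2).elim
        · by_cases h3 : (['r','e',':'] : List Char).isPrefixOf (c :: t) = true
          · exact (excl13 h1 h3).elim
          · simp only [bStartsAny, List.any_cons, List.any_nil, h1, h2, h3]
            simp
            try push_cast
            try ring
      · by_cases h2 : (['f','w','d',':'] : List Char).isPrefixOf (c :: t) = true
        · by_cases h3 : (['r','e',':'] : List Char).isPrefixOf (c :: t) = true
          · exact (excl23 h2 h3).elim
          · simp only [bStartsAny, List.any_cons, List.any_nil, h1, h2, h3]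
            simp
            try push_cast
            try ring
        · by_cases h3 : (['r','e',':'] : List Char).isPrefixOf (c :: t) = true
          · simp only [bStartsAny, List.any_cons, List.any_nil, h1, h2, h3]
            simp
            try push_cast
            try ring
          · simp only [bStartsAny, List.any_cons, List.any_nil, h1, h2, h3]
            simp
            try push_cast
            try ring

-- ===== VERDICT (by name: the statement is the Claim_ definition above) =====
theorem email_chain_count_spec : Claim_equal_email_chain_count := by
  intro subject _
  unfold Spec_email_chain_count email_chain_count email_chain_count_alt
  simp only [List.foldl, PySem.Str.isIn, PySem.Str.count]
  have hfw : ("fw:".toList : List Char) = ['f','w',':'] := by decide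
  have hfwd : ("fwd:".toList : List Char) = ['f','w','d',':'] := by decide
  have hre : ("re:".toList : List Char) = ['r','e',':'] := by decide
  rw [hfw, hfwd, hre, bScan_eq,
    step_eq (by unfold BorderFree; decide) (by decide),
    step_eq (by unfold BorderFree; decide) (by decide),
    step_eq (by unfold BorderFree; decide) (by decide)]
  ring
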